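-- pv_equiv track=rewrite | github.com/johannespaju/2024-fall-python | PROJECT/project2/pizza_kiosk.py | count_ingredients
-- ===== SOURCE A (Python) =====
-- def count_ingredients(menu: dict, order: list) -> dict | None:
--     """Count number of ingredients in order."""
--     result = {}
--
--     for pizza in order:
--         if pizza not in menu:
--             return {}
--
--         for ingredient in menu[pizza]:
--             if ingredient in result:
--                 result[ingredient] += 1
--             else:
--                 result[ingredient] = 1
--
--     return result
-- ===== SOURCE B (Python) =====
-- def count_ingredients(menu: dict, order: list) -> dict | None:
--     """Count number of ingredients in order."""
--     if any(p not in menu for p in order):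
--         return {}
--     freq = {}
--     for p in order:
--         freq[p] = freq.get(p, 0) + 1
--     result = {}
--     for pizza, c in freq.items():
--         for ingredient in menu[pizza]:
--             result[ingredient] = result.get(ingredient, 0) + c
--     return result
-- ===== Notes on version B (the rewrite author's own statement) =====
-- stated objective: alternative
-- what changed: B validates the whole order in a separate up-front pass, then builds a pizza-frequency table and adds count-weighted ingredient contributions per distinct pizza, instead of A's single interleaved loop that re-walks the ingredient list of every repeated pizza and checks membership per ingredient.
import Mathlib
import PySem

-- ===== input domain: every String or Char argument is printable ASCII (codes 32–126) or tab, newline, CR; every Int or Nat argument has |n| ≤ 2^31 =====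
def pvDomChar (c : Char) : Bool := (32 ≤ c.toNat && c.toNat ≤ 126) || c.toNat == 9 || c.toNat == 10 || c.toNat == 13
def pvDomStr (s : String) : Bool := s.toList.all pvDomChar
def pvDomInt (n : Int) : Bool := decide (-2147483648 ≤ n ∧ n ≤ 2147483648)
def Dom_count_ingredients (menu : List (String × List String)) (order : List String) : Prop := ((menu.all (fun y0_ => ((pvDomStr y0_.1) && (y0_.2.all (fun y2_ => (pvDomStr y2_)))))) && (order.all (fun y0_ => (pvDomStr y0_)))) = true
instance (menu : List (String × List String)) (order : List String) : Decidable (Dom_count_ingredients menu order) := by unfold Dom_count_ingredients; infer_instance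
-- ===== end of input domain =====

-- B validates the whole order up front, then builds a pizza-frequency table and adds each
-- distinct pizza's ingredient contributions multiplied by its count, instead of re-walking
-- every repeated pizza (objective: alternative decomposition; same return value).

-- ===== PORT A =====
def pvGoA (menu : PySem.Dict String (List String)) : List String → PySem.Dict String Int → PySem.Dict String Int
  | [], result => result
  | pizza :: rest, result =>
      if menu.contains pizza then
        pvGoA menu rest
          ((menu.getD pizza []).foldl
            (fun r ingredient =>
              if r.contains ingredient then r.modify ingredient 0 (· + 1)
              else r.insert ingredient 1) result)
      else PySem.Dict.empty

def count_ingredients (menu : List (String × List String)) (order : List String) : List (String × Int) :=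
  (pvGoA ⟨menu⟩ order PySem.Dict.empty).items

-- ===== PORT B =====
def count_ingredients_alt (menu : List (String × List String)) (order : List String) : List (String × Int) :=
  let m : PySem.Dict String (List String) := ⟨menu⟩
  if order.any (fun p => !(m.contains p)) then []
  else
    let freq : PySem.Dict String Int :=
      order.foldl (fun d p => d.insert p (d.getD p 0 + 1)) PySem.Dict.empty
    (freq.items.foldl
      (fun res pc =>
        (m.getD pc.1 []).foldl (fun r ingredient => r.insert ingredient (r.getD ingredient 0 + pc.2)) res)
      PySem.Dict.empty).items

-- ===== PRECONDITION & SPEC =====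
def Spec_count_ingredients (menu : List (String × List String)) (order : List String) (out : List (String × Int)) : Prop := out = count_ingredients_alt menu order
instance (menu : List (String × List String)) (order : List String) (out : List (String × Int)) : Decidable (Spec_count_ingredients menu order out) := by unfold Spec_count_ingredients; infer_instance

-- ===== CLAIM (what is proved, stated in full; the proofs are below) =====
def Claim_equal_count_ingredients : Prop := ∀ (menu : List (String × List String)) (order : List String), Dom_count_ingredients menu order → Spec_count_ingredients menu order (count_ingredients menu order)

-- ===== LEMMAS AND PROOFS =====
lemma stepA_eq (r : PySem.Dict String Int) (i : String) :
    (if r.contains i then r.modify i 0 (· + 1) else r.insert i 1) = r.insert i (r.getD i 0 + 1) := by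
  by_cases h : r.contains i = true
  · simp only [h, if_true]
    apply PySem.Dict.ext
    simp [PySem.Dict.modify, PySem.Dict.insert, PySem.Dict.getD, PySem.Dict.get?, PySem.Dict.contains] at *
  · have hf := eq_false_of_ne_true h
    have h0 : r.getD i 0 = 0 := by
      have := (PySem.Dict.get?_eq_none_iff_contains r i).mpr hf
      simp [PySem.Dict.getD, this]
    simp [hf, h0]

lemma goA_missing (m : PySem.Dict String (List String)) (order : List String)
    (h : ∃ p ∈ order, m.contains p = false) (d : PySem.Dict String Int) :
    pvGoA m order d = PySem.Dict.empty := by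
  induction order generalizing d with
  | nil => simp at h
  | cons p rest ih =>
    by_cases hp : m.contains p = true
    · simp only [pvGoA, hp, if_true]
      apply ih
      rcases h with ⟨q, hq, hqc⟩
      rcases List.mem_cons.mp hq with rfl | hq'
      · rw [hp] at hqc; cases hqc
      · exact ⟨q, hq', hqc⟩
    · simp [pvGoA, eq_false_of_ne_true hp]

lemma goA_all (m : PySem.Dict String (List String)) (order : List String)
    (h : ∀ p ∈ order, m.contains p = true) (d : PySem.Dict String Int) :
    pvGoA m order d
      = (order.flatMap (fun p => m.getD p [])).foldl (fun r i => r.insert i (r.getD i 0 + 1)) d := by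
  induction order generalizing d with
  | nil => simp [pvGoA]
  | cons p rest ih =>
    have hp := h p (by simp)
    simp only [pvGoA, hp, if_true, List.flatMap_cons, List.foldl_append]
    rw [ih (fun q hq => h q (by simp [hq]))]
    simp only [stepA_eq]

lemma getD_foldl_insert_add_c (l : List String) (d : PySem.Dict String Int) (k : String) (c : Int) :
    (l.foldl (fun r i => r.insert i (r.getD i 0 + c)) d).getD k 0
      = d.getD k 0 + c * (l.count k : Int) := by
  induction l generalizing d with
  | nil => simp
  | cons i rest ih =>
    simp only [List.foldl_cons, ih, List.count_cons]
    by_cases hk : k = i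
    · subst hk
      rw [PySem.Dict.getD_insert_self]
      simp; ring
    · rw [PySem.Dict.getD_insert_of_ne _ _ _ hk]
      have hik : (i == k) = false := by
        simp only [beq_eq_false_iff_ne, ne_eq]
        exact fun e => hk e.symm
      simp [hik]

lemma keys_outer (f : String → List String) (ps : List (String × Int)) (d : PySem.Dict String Int) :
    (ps.foldl (fun res pc => (f pc.1).foldl (fun r i => r.insert i (r.getD i 0 + pc.2)) res) d).keys
      = ps.foldl (fun ks pc => PySem.Set.update ks (f pc.1)) d.keys := by
  induction ps generalizing d with
  | nil => rfl
  | cons pc rest ih =>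
    simp only [List.foldl_cons, ih, PySem.Dict.keys_foldl_insert]

lemma nodup_outer (f : String → List String) (ps : List (String × Int)) (d : PySem.Dict String Int)
    (h : d.keys.Nodup) :
    (ps.foldl (fun res pc => (f pc.1).foldl (fun r i => r.insert i (r.getD i 0 + pc.2)) res) d).keys.Nodup := by
  induction ps generalizing d with
  | nil => exact h
  | cons pc rest ih =>
    exact ih _ (PySem.Dict.nodup_keys_foldl_insert _ _ _ h)

lemma getD_outer (f : String → List String) (ps : List (String × Int)) (d : PySem.Dict String Int) (k : String) :
    (ps.foldl (fun res pc => (f pc.1).foldl (fun r i => r.insert i (r.getD i 0 + pc.2)) res) d).getD k 0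
      = d.getD k 0 + (ps.map (fun pc => pc.2 * (((f pc.1).count k : Int)))).sum := by
  induction ps generalizing d with
  | nil => simp
  | cons pc rest ih =>
    simp only [List.foldl_cons, ih, getD_foldl_insert_add_c, List.map_cons, List.sum_cons]
    ring

lemma update_of_subset (s : PySem.Set String) (l : List String) (h : ∀ x ∈ l, x ∈ s) :
    PySem.Set.update s l = s := by
  rw [PySem.Set.update_eq_append_filter]
  have hnil : List.filter (fun y => !PySem.Set.contains s y) (PySem.Set.ofList l) = [] := by
    apply List.filter_eq_nil_iff.mpr
    intro y hy
    have hys : y ∈ s := h y ((PySem.Set.mem_ofList l y).mp hy)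
    simp
    exact hys
  rw [hnil, List.append_nil]

lemma mem_update_left (s : PySem.Set String) (l : List String) (x : String) (h : x ∈ s) :
    x ∈ PySem.Set.update s l := (PySem.Set.mem_update s l x).mpr (Or.inl h)

lemma fold_upd_dedup (f : String → List String) (order : List String) :
    ∀ (s acc : List String), s.Nodup → (∀ p ∈ s, ∀ x ∈ f p, x ∈ acc) →
    List.foldl (fun ks p => PySem.Set.update ks (f p)) acc order
      = List.foldl (fun ks p => PySem.Set.update ks (f p)) acc ((PySem.Set.update s order).drop s.length) := by
  induction order with
  | nil => intro s acc _ _; simp [PySem.Set.update]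
  | cons p rest ih =>
    intro s acc hnd hsub
    rw [PySem.Set.update_cons]
    by_cases hp : p ∈ s
    · rw [PySem.Set.add_of_mem hp]
      have hacc : PySem.Set.update acc (f p) = acc := update_of_subset acc (f p) (hsub p hp)
      simp only [List.foldl_cons, hacc]
      exact ih s acc hnd hsub
    · rw [PySem.Set.add_of_not_mem hp]
      have hsplit := PySem.Set.update_eq_append_filter (s ++ [p]) rest
      set r := List.filter (fun y => !PySem.Set.contains (s ++ [p]) y) (PySem.Set.ofList rest) with hr
      rw [hsplit, List.append_assoc, List.drop_left]
      simp only [List.foldl_cons, List.cons_append, List.nil_append]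
      have ih' := ih (s ++ [p]) (PySem.Set.update acc (f p))
        (by simp [List.nodup_append, hnd]; exact fun a ha e => hp (e ▸ ha))
        (by
          intro q hq x hx
          rcases List.mem_append.mp hq with hq' | hq'
          · exact mem_update_left _ _ _ (hsub q hq' x hx)
          · have : q = p := by simpa using hq'
            subst this
            exact (PySem.Set.mem_update acc (f q) x).mpr (Or.inr hx))
      rw [ih']
      congr 1
      rw [hsplit, List.append_assoc]
      have : (s ++ ([p] ++ r)).drop (s ++ [p]).length = ((s ++ [p]) ++ r).drop (s ++ [p]).length := by
        rw [List.append_assoc]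
      rw [this, List.drop_left]

lemma foldl_upd_flatMap (f : String → List String) (ps : List String) (acc : List String) :
    List.foldl (fun ks p => PySem.Set.update ks (f p)) acc ps
      = PySem.Set.update acc (ps.flatMap f) := by
  induction ps generalizing acc with
  | nil => simp [PySem.Set.update]
  | cons p rest ih =>
    simp only [List.foldl_cons, List.flatMap_cons, PySem.Set.update_append, ih]

lemma regroup (f : String → List String) (order : List String) (k : String) :
    (((order.flatMap f).count k : Int))
      = ((PySem.Set.ofList order).map (fun p => ((order.count p : Int)) * (((f p).count k : Int)))).sum := by
  have h1 : (order.flatMap f).count k = (order.map (fun p => (f p).count k)).sum := by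
    induction order with
    | nil => simp
    | cons p rest ih => simp [List.count_append, ih]
  have h2 : ((order.map (fun p => (((f p).count k : Int)))).sum)
      = ∑ m ∈ order.toFinset, (order.count m) • (((f m).count k : Int)) := by
    have := Finset.sum_multiset_map_count (order : Multiset String)
      (fun p => (((f p).count k : Int)))
    simpa using this
  have h3 : ((PySem.Set.ofList order).toFinset : Finset String) = order.toFinset := by
    ext x; simp [PySem.Set.mem_ofList]
  have h4 := List.sum_toFinset (fun p => ((order.count p : Int)) * (((f p).count k : Int)))
      (PySem.Set.nodup_ofList order)
  rw [← h4, h3, h1, Nat.cast_list_sum, List.map_map]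
  have hcomp : (Nat.cast ∘ fun p => List.count k (f p) : String → Int)
      = fun p => ((List.count k (f p) : Int)) := rfl
  rw [hcomp, h2]
  apply Finset.sum_congr rfl
  intro x _
  simp

lemma Bside (f : String → List String) (order : List String) :
    ((PySem.Dict.counter order).items.foldl
        (fun res pc => (f pc.1).foldl (fun r i => r.insert i (r.getD i 0 + pc.2)) res)
        PySem.Dict.empty).items
      = (PySem.Dict.counter (order.flatMap f)).items := by
  rw [PySem.Dict.items_counter]
  set L : List String := order.flatMap f with hL
  set dB : PySem.Dict String Int :=
    (((PySem.Set.ofList order).map (fun k => (k, (order.count k : Int)))).foldl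
      (fun res pc => (f pc.1).foldl (fun r i => r.insert i (r.getD i 0 + pc.2)) res)
      PySem.Dict.empty) with hdB
  have hkeys : (PySem.Dict.counter L).keys = dB.keys := by
    rw [PySem.Dict.keys_counter, hdB, keys_outer, List.foldl_map]
    have h1 : PySem.Set.ofList L = List.foldl (fun ks p => PySem.Set.update ks (f p)) [] order := by
      rw [hL, ← PySem.Set.update_nil_left, ← foldl_upd_flatMap]
    have h2 := fold_upd_dedup f order [] [] List.nodup_nil (by simp)
    simp only [List.length_nil, List.drop_zero, PySem.Set.update_nil_left] at h2
    rw [h1, h2]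
    rfl
  have hvals : ∀ k, (PySem.Dict.counter L).getD k 0 = dB.getD k 0 := by
    intro k
    rw [PySem.Dict.getD_counter, hdB, getD_outer, List.map_map]
    have hcomp : ((fun pc : String × Int => pc.2 * (((f pc.1).count k : Int))) ∘
        (fun p => (p, (order.count p : Int)))) =
        fun p => ((order.count p : Int)) * (((f p).count k : Int)) := rfl
    rw [hcomp]
    have he : (PySem.Dict.empty : PySem.Dict String Int).getD k 0 = 0 := rfl
    rw [he, zero_add, hL, regroup]
  have hnodB : dB.keys.Nodup := nodup_outer f _ _ List.nodup_nil
  rw [PySem.Dict.items_eq_map_keys (PySem.Dict.counter L) (PySem.Dict.nodup_keys_counter L) 0,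
      PySem.Dict.items_eq_map_keys dB hnodB 0, hkeys]
  apply List.map_congr_left
  intro k _
  rw [hvals k]


lemma count_ingredients_eq_alt (menu : List (String × List String)) (order : List String) :
    count_ingredients menu order = count_ingredients_alt menu order := by
  set m : PySem.Dict String (List String) := ⟨menu⟩ with hm
  by_cases hg : (order.any (fun p => !(m.contains p))) = true
  · rcases List.any_eq_true.mp hg with ⟨p, hp, hc⟩
    have hc' : m.contains p = false := by simpa using hc
    simp only [count_ingredients, count_ingredients_alt, ← hm, hg, if_true]
    rw [goA_missing m order ⟨p, hp, hc'⟩]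
    rfl
  · have hall : ∀ p ∈ order, m.contains p = true := by
      intro p hp
      by_contra hcp
      exact hg (List.any_eq_true.mpr ⟨p, hp, by simp [eq_false_of_ne_true hcp]⟩)
    have hg' := eq_false_of_ne_true hg
    simp only [count_ingredients, count_ingredients_alt, ← hm, hg', Bool.false_eq_true, if_false]
    rw [goA_all m order hall, PySem.Dict.foldl_insert_getD_add_one_eq_counter,
        PySem.Dict.foldl_insert_getD_add_one_eq_counter]
    rw [← Bside (fun p => m.getD p []) order]

-- ===== VERDICT (by name: the statement is the Claim_ definition above) =====
theorem count_ingredients_spec : Claim_equal_count_ingredients := by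
  intro menu order _
  unfold Spec_count_ingredients
  exact count_ingredients_eq_alt menu order
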